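-- pv_equiv track=rewrite | github.com/RamesTheGeneric/Protogen-Head-RPI | old/owo-pi.py | row_to_rgb
-- ===== SOURCE A (Python) =====
-- def row_to_rgb(row, col_on, col_off):
--   new_row = []
--   for byte in row:
--     for i in range(8):
--       bit = byte >> 7-i & 1
--       if bit == 1:
--         new_row.append(col_on)
--       else:
--         new_row.append(col_off)
--   return new_row
-- ===== SOURCE B (Python) =====
-- def row_to_rgb(row, col_on, col_off):
--     # Build a 256-entry lookup table by doubling: after k rounds table[v] is the
--     # k-bit MSB-first color pattern of v; then one table lookup per input byte.
--     table = [[]]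
--     for _ in range(8):
--         table = [[col_off] + p for p in table] + [[col_on] + p for p in table]
--     out = []
--     for byte in row:
--         out.extend(table[byte % 256])
--     return out
-- ===== Notes on version B (the rewrite author's own statement) =====
-- stated objective: faster
-- what changed: B precomputes a 256-entry lookup table of 8-color patterns, built once by repeated doubling (prepend col_off to every pattern, then col_on) with no per-bit arithmetic, and then emits one table lookup (index byte % 256) plus one extend per input byte, instead of A's 8-iteration shift-and-mask inner loop per byte.
import Mathlib
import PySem

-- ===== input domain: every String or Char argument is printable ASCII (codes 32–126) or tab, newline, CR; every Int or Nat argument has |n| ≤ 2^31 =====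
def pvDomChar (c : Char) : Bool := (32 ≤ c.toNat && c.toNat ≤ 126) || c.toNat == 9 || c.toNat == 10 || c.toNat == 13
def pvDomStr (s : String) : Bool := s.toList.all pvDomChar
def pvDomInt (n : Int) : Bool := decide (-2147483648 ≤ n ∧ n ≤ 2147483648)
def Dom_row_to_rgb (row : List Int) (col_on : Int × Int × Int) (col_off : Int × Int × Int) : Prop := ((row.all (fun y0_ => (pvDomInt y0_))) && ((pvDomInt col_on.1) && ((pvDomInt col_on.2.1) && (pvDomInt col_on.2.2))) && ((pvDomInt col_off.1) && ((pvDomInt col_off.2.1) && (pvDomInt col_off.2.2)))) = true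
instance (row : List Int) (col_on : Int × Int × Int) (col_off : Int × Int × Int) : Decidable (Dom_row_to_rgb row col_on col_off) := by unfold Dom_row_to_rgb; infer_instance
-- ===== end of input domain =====

-- B builds a 256-entry pattern table once by doubling (no per-bit arithmetic) and does one
-- table lookup per input byte instead of A's per-byte shift-and-mask inner loop (the timing
-- run measured B faster by a constant factor).
-- ===== PORT A =====
-- 'byte >> 7-i' is Int shiftRight (shift amount 0..7, so .toNat is exact); '& 1' is PySem.Int.band.
def row_to_rgb (row : List Int) (col_on : Int × Int × Int) (col_off : Int × Int × Int) : List (Int × Int × Int) :=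
  row.foldl (fun new_row byte =>
    (PySem.List.pyRange 0 8 1).foldl (fun nr i =>
      let bit := PySem.Int.band (Int.shiftRight byte (7 - i).toNat) 1
      if bit = 1 then nr ++ [col_on] else nr ++ [col_off]) new_row) []

-- ===== PORT B =====
-- table = [[]]; 8 times: table = [[col_off]+p for p in table] + [[col_on]+p for p in table];
-- then for each byte: out += table[byte % 256]. The index is always 0..255 < len table = 256,
-- so the .getD [] default (Python's IndexError case) is never taken.
def row_to_rgb_alt (row : List Int) (col_on : Int × Int × Int) (col_off : Int × Int × Int) : List (Int × Int × Int) :=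
  let table := (PySem.List.pyRange 0 8 1).foldl
    (fun t _ => t.map (fun p => col_off :: p) ++ t.map (fun p => col_on :: p))
    ([[]] : List (List (Int × Int × Int)))
  row.foldl (fun out byte =>
    out ++ (PySem.List.pyGet? table (PySem.Int.mod byte 256)).getD []) []

-- ===== PRECONDITION & SPEC =====
def Spec_row_to_rgb (row : List Int) (col_on : Int × Int × Int) (col_off : Int × Int × Int) (out : List (Int × Int × Int)) : Prop := out = row_to_rgb_alt row col_on col_off
instance (row : List Int) (col_on : Int × Int × Int) (col_off : Int × Int × Int) (out : List (Int × Int × Int)) : Decidable (Spec_row_to_rgb row col_on col_off out) := by unfold Spec_row_to_rgb; infer_instance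

-- ===== CLAIM (what is proved, stated in full; the proofs are below) =====
def Claim_equal_row_to_rgb : Prop := ∀ (row : List Int) (col_on : Int × Int × Int) (col_off : Int × Int × Int), Dom_row_to_rgb row col_on col_off → Spec_row_to_rgb row col_on col_off (row_to_rgb row col_on col_off)

-- ===== LEMMAS AND PROOFS =====

-- The k-bit MSB-first color pattern of v (what one table entry denotes).
def pvChunk (con coff : Int × Int × Int) : Nat → Nat → List (Int × Int × Int)
  | 0, _ => []
  | k+1, v => (if v.testBit k then con else coff) :: pvChunk con coff k v

-- One doubling step of B's table construction.
def pvStep (con coff : Int × Int × Int) (t : List (List (Int × Int × Int))) :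
    List (List (Int × Int × Int)) :=
  t.map (fun p => coff :: p) ++ t.map (fun p => con :: p)

lemma pvChunk_add_pow (con coff : Int × Int × Int) :
    ∀ (k n v : Nat), k ≤ n → pvChunk con coff k (2 ^ n + v) = pvChunk con coff k v := by
  intro k
  induction k with
  | zero => intro n v _; rfl
  | succ k ih =>
      intro n v h
      simp only [pvChunk, ih n v (by omega),
        Nat.testBit_two_pow_add_gt (by omega : k < n) v]

lemma pv_iterate_step (con coff : Int × Int × Int) :
    ∀ k : Nat, (pvStep con coff)^[k] [[]]
      = (List.range (2 ^ k)).map (fun v => pvChunk con coff k v) := by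
  intro k
  induction k with
  | zero => rfl
  | succ k ih =>
      rw [Function.iterate_succ_apply', ih]
      have h2 : 2 ^ (k + 1) = 2 ^ k + 2 ^ k := by ring
      rw [h2, List.range_add]
      simp only [pvStep, List.map_map, List.map_append]
      congr 1
      · apply List.map_congr_left
        intro v hv
        have hvlt : v < 2 ^ k := List.mem_range.mp hv
        simp [pvChunk, Nat.testBit_lt_two_pow hvlt]
      · apply List.map_congr_left
        intro v hv
        have hvlt : v < 2 ^ k := List.mem_range.mp hv
        have ht : (2 ^ k + v).testBit k = true := by
          rw [Nat.testBit_two_pow_add_eq, Nat.testBit_lt_two_pow hvlt]; rfl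
        simp [pvChunk, ht, pvChunk_add_pow con coff k k v le_rfl]

-- B's table foldl IS pvStep iterated 8 times (pyRange 0 8 1 has 8 elements, all ignored).
lemma pv_table_eq (con coff : Int × Int × Int) :
    (PySem.List.pyRange 0 8 1).foldl
      (fun t _ => t.map (fun p => coff :: p) ++ t.map (fun p => con :: p))
      ([[]] : List (List (Int × Int × Int)))
    = (List.range 256).map (fun v => pvChunk con coff 8 v) := by
  have h8 : PySem.List.pyRange 0 8 1 = [0,1,2,3,4,5,6,7] := by decide
  rw [h8]
  have : ([0,1,2,3,4,5,6,7] : List Int).foldl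
      (fun t _ => t.map (fun p => coff :: p) ++ t.map (fun p => con :: p))
      ([[]] : List (List (Int × Int × Int))) = (pvStep con coff)^[8] [[]] := rfl
  rw [this, pv_iterate_step con coff 8]
  norm_num

-- One byte: A's inner loop appended to acc equals acc ++ table[b % 256].
lemma pv_byte_eq (b : Int) (con coff : Int × Int × Int) (acc : List (Int × Int × Int)) :
    (PySem.List.pyRange 0 8 1).foldl (fun nr i =>
      let bit := PySem.Int.band (Int.shiftRight b (7 - i).toNat) 1
      if bit = 1 then nr ++ [con] else nr ++ [coff]) acc
    = acc ++ (PySem.List.pyGet?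
        ((List.range 256).map (fun v => pvChunk con coff 8 v)) (PySem.Int.mod b 256)).getD [] := by
  -- the index is in range: rewrite the lookup to pvChunk 8 n with ↑n = b % 256
  have h256 : (0:Int) < 256 := by norm_num
  have hmod : PySem.Int.mod b 256 = b % 256 := PySem.Int.mod_eq_emod_of_pos h256
  have hlo : 0 ≤ b % 256 := Int.emod_nonneg b (by norm_num)
  have hhi : b % 256 < 256 := Int.emod_lt_of_pos b (by norm_num)
  set n : Nat := (b % 256).toNat with hn
  have hcast : ((n : Int)) = b % 256 := Int.toNat_of_nonneg hlo
  have hnlt : n < 256 := by omega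
  have hget : (PySem.List.pyGet?
      ((List.range 256).map (fun v => pvChunk con coff 8 v)) (PySem.Int.mod b 256)).getD []
      = pvChunk con coff 8 n := by
    rw [hmod, ← hcast, PySem.List.pyGet?_natCast]
    simp [List.getElem?_map, List.getElem?_range hnlt]
  rw [hget]
  -- unfold A's eight iterations into eight appended elements
  have hr : PySem.List.pyRange 0 8 1 = [0,1,2,3,4,5,6,7] := by decide
  have hfun : (fun (nr : List (Int × Int × Int)) (i : Int) =>
      let bit := PySem.Int.band (Int.shiftRight b (7 - i).toNat) 1
      if bit = 1 then nr ++ [con] else nr ++ [coff])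
      = (fun nr i => nr ++ [if PySem.Int.band (Int.shiftRight b (7 - i).toNat) 1 = 1 then con else coff]) := by
    funext nr i; dsimp only; split <;> rfl
  rw [hfun, PySem.List.foldl_append_singleton_eq_map, hr]
  congr 1
  -- element-wise: bit j of b (shift/mask) = testBit j of n, for j = 7..0
  have hs : ∀ (m : Int) (j : Nat), Int.shiftRight m j = m / ((2 ^ j : Nat) : Int) :=
    fun m j => Int.shiftRight_eq_div_pow m j
  have hband : ∀ x : Int, PySem.Int.band x 1 = x % 2 := by
    intro x; rw [PySem.Int.band_one, PySem.Int.mod_eq_emod_of_pos (by norm_num)]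
  have hbit : ∀ j : Nat, j < 8 →
      ((if n.testBit j then con else coff)
        = (if PySem.Int.band (Int.shiftRight b j) 1 = 1 then con else coff)) := by
    intro j hj
    rw [hband, hs b j, Nat.testBit_eq_decide_div_mod_eq]
    refine if_congr ?_ rfl rfl
    interval_cases j <;>
      · simp only [decide_eq_true_eq]; push_cast; omega
  simp only [List.map, pvChunk]
  norm_num [show Int.toNat 7 = 7 from rfl, show Int.toNat 6 = 6 from rfl,
    show Int.toNat 5 = 5 from rfl, show Int.toNat 4 = 4 from rfl,
    show Int.toNat 3 = 3 from rfl, show Int.toNat 2 = 2 from rfl]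
  refine ⟨?_, ?_, ?_, ?_, ?_, ?_, ?_, ?_⟩
  · exact (hbit 7 (by omega)).symm
  · exact (hbit 6 (by omega)).symm
  · exact (hbit 5 (by omega)).symm
  · exact (hbit 4 (by omega)).symm
  · exact (hbit 3 (by omega)).symm
  · exact (hbit 2 (by omega)).symm
  · simpa using (hbit 1 (by omega)).symm
  · simpa using (hbit 0 (by omega)).symm

lemma pv_fold_eq (con coff : Int × Int × Int) :
    ∀ (row : List Int) (acc : List (Int × Int × Int)),
    row.foldl (fun new_row byte =>
      (PySem.List.pyRange 0 8 1).foldl (fun nr i =>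
        let bit := PySem.Int.band (Int.shiftRight byte (7 - i).toNat) 1
        if bit = 1 then nr ++ [con] else nr ++ [coff]) new_row) acc
    = row.foldl (fun out byte =>
        out ++ (PySem.List.pyGet?
          ((List.range 256).map (fun v => pvChunk con coff 8 v)) (PySem.Int.mod byte 256)).getD []) acc := by
  intro row
  induction row with
  | nil => intro acc; rfl
  | cons b t ih =>
      intro acc
      simp only [List.foldl]
      rw [pv_byte_eq b con coff acc]
      exact ih _

-- ===== VERDICT (by name: the statement is the Claim_ definition above) =====
theorem row_to_rgb_spec : Claim_equal_row_to_rgb := by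
  intro row con coff _
  unfold Spec_row_to_rgb row_to_rgb row_to_rgb_alt
  rw [pv_table_eq con coff]
  exact pv_fold_eq con coff row []
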